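-- pv_equiv track=rewrite | github.com/lajuman/HackerRank | Python/No Idea/main.py | calculate_happiness
-- ===== SOURCE A (Python) =====
-- def calculate_happiness(n, m, array, set_a, set_b):
--     happiness = 0
--     for num in array:
--         if num in set_a:
--             happiness += 1
--         elif num in set_b:
--             happiness -= 1
--     return happiness
-- ===== SOURCE B (Python) =====
-- def calculate_happiness(n, m, array, set_a, set_b):
--     freq = {}
--     for num in array:
--         freq[num] = freq.get(num, 0) + 1
--     a = set(set_a)
--     b = set(set_b)
--     happiness = 0
--     for val, cnt in freq.items():
--         if val in a:
--             happiness += cnt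
--         elif val in b:
--             happiness -= cnt
--     return happiness
-- ===== Notes on version B (the rewrite author's own statement) =====
-- stated objective: alternative
-- what changed: Replaces the per-element scan with list membership tests by a frequency map over the array plus sets for set_a/set_b, iterating once over distinct values weighted by multiplicity; it trades the per-element loop for a grouped pass.
import Mathlib
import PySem

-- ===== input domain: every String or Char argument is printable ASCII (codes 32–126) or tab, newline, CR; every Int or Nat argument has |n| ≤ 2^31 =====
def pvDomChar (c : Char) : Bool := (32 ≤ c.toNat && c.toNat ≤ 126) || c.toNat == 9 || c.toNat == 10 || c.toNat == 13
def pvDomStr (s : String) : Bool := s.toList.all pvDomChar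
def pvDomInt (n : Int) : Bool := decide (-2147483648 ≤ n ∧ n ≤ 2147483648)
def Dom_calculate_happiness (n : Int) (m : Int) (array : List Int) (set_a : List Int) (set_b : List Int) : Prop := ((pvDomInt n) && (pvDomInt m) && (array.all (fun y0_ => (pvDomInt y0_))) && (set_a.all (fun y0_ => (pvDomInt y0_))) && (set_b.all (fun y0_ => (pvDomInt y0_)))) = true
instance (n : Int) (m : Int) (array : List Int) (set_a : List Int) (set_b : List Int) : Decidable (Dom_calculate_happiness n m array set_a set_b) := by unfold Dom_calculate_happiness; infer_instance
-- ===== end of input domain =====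

-- B replaces A's per-element scan (with linear membership tests) by a frequency map over the
-- array plus sets for set_a/set_b, iterating once over distinct values weighted by multiplicity.


-- ===== PORT A =====
def calculate_happiness (n : Int) (m : Int) (array : List Int) (set_a : List Int) (set_b : List Int) : Int :=
  array.foldl (fun happiness num =>
    if set_a.contains num then happiness + 1
    else if set_b.contains num then happiness - 1
    else happiness) 0

-- ===== PORT B =====
def calculate_happiness_alt (n : Int) (m : Int) (array : List Int) (set_a : List Int) (set_b : List Int) : Int :=
  let freq : PySem.Dict Int Int := array.foldl (fun d num => d.insert num (d.getD num 0 + 1)) PySem.Dict.empty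
  let a : PySem.Set Int := PySem.Set.ofList set_a
  let b : PySem.Set Int := PySem.Set.ofList set_b
  freq.items.foldl (fun happiness p =>
    if PySem.Set.contains a p.1 then happiness + p.2
    else if PySem.Set.contains b p.1 then happiness - p.2
    else happiness) 0

-- ===== PRECONDITION & SPEC =====
def Spec_calculate_happiness (n : Int) (m : Int) (array : List Int) (set_a : List Int) (set_b : List Int) (out : Int) : Prop := out = calculate_happiness_alt n m array set_a set_b
instance (n : Int) (m : Int) (array : List Int) (set_a : List Int) (set_b : List Int) (out : Int) : Decidable (Spec_calculate_happiness n m array set_a set_b out) := by unfold Spec_calculate_happiness; infer_instance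

-- ===== CLAIM (what is proved, stated in full; the proofs are below) =====
def Claim_equal_calculate_happiness : Prop := ∀ (n : Int) (m : Int) (array : List Int) (set_a : List Int) (set_b : List Int), Dom_calculate_happiness n m array set_a set_b → Spec_calculate_happiness n m array set_a set_b (calculate_happiness n m array set_a set_b)

-- ===== LEMMAS AND PROOFS =====

-- the per-element weight of A's branch
def pvW (set_a set_b : List Int) (num : Int) : Int :=
  if set_a.contains num then 1 else if set_b.contains num then -1 else 0

lemma foldlA_eq (set_a set_b : List Int) :
    ∀ (xs : List Int) (h0 : Int),
      xs.foldl (fun happiness num =>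
        if set_a.contains num then happiness + 1
        else if set_b.contains num then happiness - 1
        else happiness) h0 = h0 + (xs.map (pvW set_a set_b)).sum := by
  intro xs
  induction xs with
  | nil => simp
  | cons x xs ih =>
    intro h0
    simp only [List.foldl_cons, List.map_cons, List.sum_cons, ih, pvW]
    split_ifs <;> ring

lemma foldlB_eq (a b : PySem.Set Int) :
    ∀ (ps : List (Int × Int)) (h0 : Int),
      ps.foldl (fun happiness p =>
        if PySem.Set.contains a p.1 then happiness + p.2
        else if PySem.Set.contains b p.1 then happiness - p.2
        else happiness) h0
      = h0 + (ps.map (fun p =>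
          (if PySem.Set.contains a p.1 then 1
           else if PySem.Set.contains b p.1 then -1 else 0) * p.2)).sum := by
  intro ps
  induction ps with
  | nil => simp
  | cons p ps ih =>
    intro h0
    simp only [List.foldl_cons, List.map_cons, List.sum_cons, ih]
    split_ifs <;> ring

-- sum of g k * [k = x] over a list not containing x is 0
lemma sum_ite_zero (g : Int → Int) (x : Int) :
    ∀ (l : List Int), x ∉ l →
      (l.map (fun k => g k * (if k = x then 1 else 0))).sum = 0 := by
  intro l
  induction l with
  | nil => simp
  | cons a l ih =>
    intro hx
    simp only [List.map_cons, List.sum_cons]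
    rw [ih (fun h => hx (List.mem_cons_of_mem _ h))]
    have hax : a ≠ x := fun h => hx (h ▸ List.mem_cons_self)
    simp [hax]

-- sum of g k * [k = x] over a nodup list containing x is g x
lemma sum_ite_single (g : Int → Int) (x : Int) :
    ∀ (l : List Int), l.Nodup → x ∈ l →
      (l.map (fun k => g k * (if k = x then 1 else 0))).sum = g x := by
  intro l
  induction l with
  | nil => simp
  | cons a l ih =>
    intro hnd hx
    simp only [List.map_cons, List.sum_cons]
    by_cases hax : a = x
    · subst hax
      rw [sum_ite_zero g a l (List.nodup_cons.mp hnd).1]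
      simp
    · have hxl : x ∈ l := by
        rcases List.mem_cons.mp hx with h | h
        · exact absurd h.symm hax
        · exact h
      rw [ih (List.nodup_cons.mp hnd).2 hxl]
      simp [hax]

-- grouped weighted sum over a covering nodup list equals the per-element sum
lemma grouped_sum (g : Int → Int) :
    ∀ (xs l : List Int), l.Nodup → (∀ y ∈ xs, y ∈ l) →
      (l.map (fun k => g k * (xs.count k : Int))).sum = (xs.map g).sum := by
  intro xs
  induction xs with
  | nil => intro l _ _; simp
  | cons x xs ih =>
    intro l hnd hcov
    have hx : x ∈ l := hcov x List.mem_cons_self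
    have h1 : (l.map (fun k => g k * ((x :: xs).count k : Int))).sum
        = (l.map (fun k => g k * (xs.count k : Int))).sum
          + (l.map (fun k => g k * (if k = x then 1 else 0))).sum := by
      rw [← PySem.List.sum_map_add_int]
      apply congrArg
      apply List.map_congr_left
      intro k _
      rw [List.count_cons]
      push_cast
      by_cases h : k = x
      · simp [h]; ring
      · have hxk : (x == k) = false := by simp [Ne.symm h]
        simp [h, hxk]
    rw [h1, ih l hnd (fun y hy => hcov y (List.mem_cons_of_mem _ hy)),
        sum_ite_single g x l hnd hx]
    simp [add_comm]

-- ===== VERDICT (by name: the statement is the Claim_ definition above) =====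
theorem calculate_happiness_spec : Claim_equal_calculate_happiness := by
  intro n m array set_a set_b _
  unfold Spec_calculate_happiness calculate_happiness calculate_happiness_alt
  rw [PySem.Dict.foldl_insert_getD_add_one_eq_counter, foldlA_eq, foldlB_eq,
      PySem.Dict.items_counter, List.map_map]
  have : ((fun p : Int × Int =>
        (if PySem.Set.contains (PySem.Set.ofList set_a) p.1 then 1
         else if PySem.Set.contains (PySem.Set.ofList set_b) p.1 then -1 else 0) * p.2)
        ∘ fun k => (k, (array.count k : Int)))
      = fun k => pvW set_a set_b k * (array.count k : Int) := by
    funext k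
    simp [pvW]
  rw [this, grouped_sum (pvW set_a set_b) array (PySem.Set.ofList array)
        (PySem.Set.nodup_ofList array) (fun y hy => (PySem.Set.mem_ofList array y).mpr hy)]
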